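-- pv_equiv track=rewrite | github.com/hituzi-exe/grbl_poker | src/calc.py | pairCount
-- ===== SOURCE A (Python) =====
-- import math
--
-- def pairCount(hand1, hand2, hand3, hand4, hand5):
--
--     cntList = [0] * 13
--     cnt = [x & (0x1fff) for x in [hand1, hand2, hand3, hand4, hand5]]
--
--     for c in cnt:
--         if c == 0:
--             continue
--         cntList[int(math.log2(c))] += 1
--
--     return max(cntList), len([i for i in cntList if i > 1])
-- ===== SOURCE B (Python) =====
-- import math
--
-- def pairCount(hand1, hand2, hand3, hand4, hand5):
--     vals = sorted(int(math.log2(c))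
--                   for c in (hand1 & 0x1fff, hand2 & 0x1fff, hand3 & 0x1fff,
--                             hand4 & 0x1fff, hand5 & 0x1fff)
--                   if c != 0)
--     best = 0
--     pairs = 0
--     i = 0
--     n = len(vals)
--     while i < n:
--         j = i
--         while j < n and vals[j] == vals[i]:
--             j += 1
--         run = j - i
--         if run > best:
--             best = run
--         if run > 1:
--             pairs += 1
--         i = j
--     return best, pairs
-- ===== Notes on version B (the rewrite author's own statement) =====
-- stated objective: alternative
-- what changed: Replaces the 13-slot counting table (then max + filter over it) with extracting the rank indices of nonzero masked cards, sorting them, and one linear scan over the sorted list measuring consecutive equal runs (longest run, runs of length > 1).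
import Mathlib
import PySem

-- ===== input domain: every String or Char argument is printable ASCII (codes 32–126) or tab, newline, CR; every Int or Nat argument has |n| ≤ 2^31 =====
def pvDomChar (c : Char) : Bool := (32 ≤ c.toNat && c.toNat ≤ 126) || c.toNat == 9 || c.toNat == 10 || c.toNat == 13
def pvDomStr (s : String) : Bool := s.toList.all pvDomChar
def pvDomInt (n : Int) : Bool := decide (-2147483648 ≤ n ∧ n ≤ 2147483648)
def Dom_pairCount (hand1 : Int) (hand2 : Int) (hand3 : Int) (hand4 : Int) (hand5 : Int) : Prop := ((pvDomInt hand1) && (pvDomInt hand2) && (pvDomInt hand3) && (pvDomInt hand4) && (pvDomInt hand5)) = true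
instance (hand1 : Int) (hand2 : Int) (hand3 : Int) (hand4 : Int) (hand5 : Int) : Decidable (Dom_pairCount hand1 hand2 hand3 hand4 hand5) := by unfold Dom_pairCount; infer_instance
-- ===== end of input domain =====

-- B replaces A's 13-slot counting table with sorting the rank indices of nonzero
-- masked cards and one linear scan over consecutive equal runs (alternative algorithm).

-- ===== PORT A =====
-- int(math.log2(c)) for 1 ≤ c ≤ 0x1fff is exactly floor(log2 c) = c.bit_length() - 1
-- (math.log2 is exact enough below 2^13 that int() truncation gives the floor);
-- ported as PySem.Int.bitLength c - 1.  max(cntList) on the (always 13-element,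
-- hence nonempty) list is PySem.List.max?, unwrapped with .getD 0 (never taken).
def pairCount (hand1 : Int) (hand2 : Int) (hand3 : Int) (hand4 : Int) (hand5 : Int) : Int × Int :=
  let cntList0 : List Int := List.replicate 13 0
  let cnt : List Int := [hand1, hand2, hand3, hand4, hand5].map (fun x => PySem.Int.band x 0x1fff)
  let cntList := cnt.foldl (fun tbl c =>
    if c = 0 then tbl
    else tbl.modify (PySem.Int.bitLength c - 1) (· + 1)) cntList0
  ((PySem.List.max? cntList (fun y => y)).getD 0,
   ((cntList.filter (fun i => decide (1 < i))).length : Int))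

-- ===== PORT B =====
-- the outer while loop of Source B: consume one run of equal values per step
-- (the inner `while vals[j] == vals[i]` is the takeWhile/dropWhile split)
def pcLoop (vals : List Int) (best : Int) (pairs : Int) : Int × Int :=
  match vals with
  | [] => (best, pairs)
  | v :: t =>
    let run : Int := 1 + ((t.takeWhile (fun x => x == v)).length : Int)
    pcLoop (t.dropWhile (fun x => x == v))
      (if best < run then run else best)
      (if 1 < run then pairs + 1 else pairs)
termination_by vals.length
decreasing_by
  simp only [List.length_cons]
  exact Nat.lt_succ_of_le (List.length_dropWhile_le _ _)

def pairCount_alt (hand1 : Int) (hand2 : Int) (hand3 : Int) (hand4 : Int) (hand5 : Int) : Int × Int :=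
  let vals : List Int :=
    ([hand1, hand2, hand3, hand4, hand5].map (fun x => PySem.Int.band x 0x1fff)).filterMap
      (fun c => if c = 0 then none else some ((PySem.Int.bitLength c : Int) - 1))
  pcLoop (PySem.List.sorted vals (fun y => y)) 0 0

-- ===== PRECONDITION & SPEC =====
def Spec_pairCount (hand1 : Int) (hand2 : Int) (hand3 : Int) (hand4 : Int) (hand5 : Int) (out : Int × Int) : Prop := out = pairCount_alt hand1 hand2 hand3 hand4 hand5
instance (hand1 : Int) (hand2 : Int) (hand3 : Int) (hand4 : Int) (hand5 : Int) (out : Int × Int) : Decidable (Spec_pairCount hand1 hand2 hand3 hand4 hand5 out) := by unfold Spec_pairCount; infer_instance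

-- ===== CLAIM (what is proved, stated in full; the proofs are below) =====
def Claim_equal_pairCount : Prop := ∀ (hand1 : Int) (hand2 : Int) (hand3 : Int) (hand4 : Int) (hand5 : Int), Dom_pairCount hand1 hand2 hand3 hand4 hand5 → Spec_pairCount hand1 hand2 hand3 hand4 hand5 (pairCount hand1 hand2 hand3 hand4 hand5)

-- ===== LEMMAS AND PROOFS =====

-- the rank-index list both programs are really about
def pcIdx (ms : List Int) : List Nat :=
  ms.filterMap (fun c => if c = 0 then none else some (PySem.Int.bitLength c - 1))

-- masked card is in [0, 8191]
theorem pc_band_range (x : Int) :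
    0 ≤ PySem.Int.band x 0x1fff ∧ PySem.Int.band x 0x1fff ≤ 8191 := by
  have hr : ((x.toNat &&& 8191 : Nat) : Int) ≤ 8191 := by
    exact_mod_cast (Nat.and_le_right (n := x.toNat) (m := 8191))
  unfold PySem.Int.band
  split_ifs with h1 h2 h2 <;> simp_all <;> omega

theorem pc_bitLength_le (c : Int) (h0 : 0 ≤ c) (h1 : c ≤ 8191) :
    PySem.Int.bitLength c ≤ 13 := by
  rcases eq_or_ne c 0 with rfl | hne
  · simp [PySem.Int.bitLength, PySem.Int.bitLengthAux]
  · by_contra h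
    have h2 := PySem.Int.two_pow_bitLength_le c hne
    have h3 : (2 : Nat) ^ 13 ≤ 2 ^ (PySem.Int.bitLength c - 1) :=
      Nat.pow_le_pow_right (by omega) (by omega)
    have h4 : c.natAbs ≤ 8191 := by omega
    omega

theorem pc_bitLength_pos (c : Int) (hne : c ≠ 0) : 1 ≤ PySem.Int.bitLength c := by
  by_contra h
  have h2 := PySem.Int.lt_two_pow_bitLength c
  have h3 : PySem.Int.bitLength c = 0 := by omega
  rw [h3] at h2
  simp at h2
  omega

-- indices are < 13
theorem pc_idx_lt (ms : List Int) (hm : ∀ c ∈ ms, 0 ≤ c ∧ c ≤ 8191) :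
    ∀ k ∈ pcIdx ms, k < 13 := by
  intro k hk
  simp only [pcIdx, List.mem_filterMap] at hk
  obtain ⟨c, hc, hck⟩ := hk
  by_cases h0 : c = 0
  · simp [h0] at hck
  · simp [h0] at hck
    have := pc_bitLength_le c (hm c hc).1 (hm c hc).2
    omega

-- modifying one slot of a tabulated list re-tabulates a pointwise-updated function
theorem pc_modify_map_range (n : Nat) (f : Nat → Int) (j : Nat) (hj : j < n) :
    ((List.range n).map f).modify j (· + 1)
      = (List.range n).map (fun k => if k = j then f j + 1 else f k) := by
  apply List.ext_getElem
  · simp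
  · intro i h1 h2
    simp only [List.getElem_modify, List.getElem_map, List.getElem_range] at *
    split_ifs with h3 h4 h4 <;> first | rfl | (subst h4; rfl) | omega

-- A's loop builds the count table of pcIdx
theorem pc_table (ms : List Int) (hm : ∀ c ∈ ms, 0 ≤ c ∧ c ≤ 8191) (f : Nat → Int) :
    ms.foldl (fun tbl c => if c = 0 then tbl
        else tbl.modify (PySem.Int.bitLength c - 1) (· + 1)) ((List.range 13).map f)
      = (List.range 13).map (fun k => f k + ((pcIdx ms).count k : Int)) := by
  induction ms generalizing f with
  | nil => simp [pcIdx]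
  | cons c ms ih =>
    by_cases h0 : c = 0
    · subst h0
      simp only [List.foldl_cons, reduceIte]
      rw [ih (fun c hc => hm c (List.mem_cons_of_mem _ hc)) f]
      simp [pcIdx]
    · have hc := hm c (List.mem_cons_self)
      have hble := pc_bitLength_le c hc.1 hc.2
      have hbpos := pc_bitLength_pos c h0
      have hj13 : PySem.Int.bitLength c - 1 < 13 := by omega
      simp only [List.foldl_cons, if_neg h0]
      rw [pc_modify_map_range 13 f _ hj13,
        ih (fun c hc => hm c (List.mem_cons_of_mem _ hc))]
      have hidx : pcIdx (c :: ms) = (PySem.Int.bitLength c - 1) :: pcIdx ms := by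
        simp [pcIdx, h0]
      rw [hidx]
      apply List.map_congr_left
      intro k hk
      by_cases hkj : k = PySem.Int.bitLength c - 1
      · subst hkj
        simp
        ring
      · simp [hkj, Ne.symm hkj]

-- dropping the head run of a sorted list removes exactly the head's occurrences
theorem pc_drop_count (v : Int) (t : List Int) (hs : (v :: t).Pairwise (· ≤ ·)) :
    (t.dropWhile (fun x => x == v)).count v = 0 := by
  rw [List.count_eq_zero]
  intro hv
  have hpw := List.pairwise_cons.mp hs
  rcases ht2 : t.dropWhile (fun x => x == v) with _ | ⟨h2, r⟩
  · rw [ht2] at hv; simp at hv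
  · rw [ht2] at hv
    have hsubt : (h2 :: r).Sublist t := ht2 ▸ List.dropWhile_sublist _
    have hh2t : h2 ∈ t := hsubt.mem (by simp)
    have hvle : v ≤ h2 := hpw.1 _ hh2t
    have hhead : (h2 == v) = false := by
      have := List.head?_dropWhile_not (fun x => x == v) t
      rw [ht2] at this; simpa using this
    have hv2 : v < h2 := lt_of_le_of_ne hvle (by
      intro h; rw [← h] at hhead; simp at hhead)
    rcases List.mem_cons.mp hv with rfl | hvr
    · omega
    · have hpw2 : (h2 :: r).Pairwise (· ≤ ·) := hpw.2.sublist hsubt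
      have : h2 ≤ v := (List.pairwise_cons.mp hpw2).1 _ hvr
      omega

theorem pc_fold_nonneg (l : List Int) : 0 ≤ l.foldl max 0 :=
  (PySem.List.le_foldl_max l 0).1

-- FOLD: running max over a tabulation that differs at one slot
theorem pc_fold_max (n : Nat) (f g : Nat → Int) (j : Nat) (hj : j < n)
    (hfg : ∀ k, k ≠ j → f k = g k) (hgj : g j = 0) :
    ((List.range n).map f).foldl max 0 = max (f j) (((List.range n).map g).foldl max 0) := by
  induction n with
  | zero => omega
  | succ n ih =>
    rw [List.range_succ, List.map_append, List.map_append, List.foldl_append, List.foldl_append]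
    simp only [List.map_cons, List.map_nil, List.foldl_cons, List.foldl_nil]
    by_cases hjn : j = n
    · subst hjn
      have hcongr : (List.range j).map f = (List.range j).map g := by
        apply List.map_congr_left
        intro k hk
        exact hfg k (by simp at hk; omega)
      rw [hcongr, hgj]
      have hG := pc_fold_nonneg ((List.range j).map g)
      rw [max_comm (((List.range j).map g).foldl max 0) (f j)]
      congr 1
      exact (max_eq_left hG).symm
    · rw [ih (by omega)]
      have hgn : g n = f n := (hfg n (fun h => hjn h.symm)).symm
      rw [hgn, max_assoc]

-- FILTER: counting >1 slots of a tabulation that differs at one slot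
theorem pc_filter_len (n : Nat) (f g : Nat → Nat) (j : Nat) (hj : j < n)
    (hfg : ∀ k, k ≠ j → f k = g k) (hgj : g j = 0) :
    ((List.range n).filter (fun k => decide (1 < f k))).length
      = (if 1 < f j then 1 else 0) + ((List.range n).filter (fun k => decide (1 < g k))).length := by
  induction n with
  | zero => omega
  | succ n ih =>
    rw [List.range_succ, List.filter_append, List.filter_append,
      List.length_append, List.length_append]
    by_cases hjn : j = n
    · subst hjn
      have hcongr : (List.range j).filter (fun k => decide (1 < f k))
          = (List.range j).filter (fun k => decide (1 < g k)) := by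
        apply List.filter_congr
        intro k hk
        have : f k = g k := hfg k (by simp at hk; omega)
        rw [this]
      rw [hcongr]
      simp only [List.filter_cons, List.filter_nil, hgj, decide_eq_true_eq]
      split_ifs <;> simp <;> omega
    · rw [ih (by omega)]
      have hgn : f n = g n := hfg n (fun h => hjn h.symm)
      simp only [List.filter_cons, List.filter_nil, hgn, decide_eq_true_eq]
      split_ifs <;> simp <;> omega

-- the run-scan of a sorted list computes table max and pair count
theorem pc_run (S : List Int) (hs : S.Pairwise (· ≤ ·))
    (hx : ∀ x ∈ S, ∃ k : Nat, k < 13 ∧ x = (k : Int)) (best pairs : Int) (hb : 0 ≤ best) :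
    pcLoop S best pairs
      = (max best (((List.range 13).map (fun (k : Nat) => (S.count (k : Int) : Int))).foldl max 0),
         pairs + (((List.range 13).filter (fun (k : Nat) => decide (1 < S.count (k : Int)))).length : Int)) := by
  suffices H : ∀ (n : Nat) (S : List Int), S.length ≤ n → S.Pairwise (· ≤ ·) →
      (∀ x ∈ S, ∃ k : Nat, k < 13 ∧ x = (k : Int)) → ∀ best pairs : Int, 0 ≤ best →
      pcLoop S best pairs
        = (max best (((List.range 13).map (fun (k : Nat) => (S.count (k : Int) : Int))).foldl max 0),
           pairs + (((List.range 13).filter (fun (k : Nat) => decide (1 < S.count (k : Int)))).length : Int)) by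
    exact H S.length S le_rfl hs hx best pairs hb
  intro n
  induction n with
  | zero =>
    intro S hlen hs hx best pairs hb
    have : S = [] := List.length_eq_zero_iff.mp (by omega)
    subst this
    rw [pcLoop]
    simp [max_eq_left hb]
  | succ n ih =>
    intro S hlen hs hx best pairs hb
    match S with
    | [] =>
      exact (by
        rw [pcLoop]
        simp [max_eq_left hb])
    | v :: t =>
      obtain ⟨kv, hkv13, hveq⟩ := hx v List.mem_cons_self
      rw [pcLoop]
      set t1 := t.takeWhile (fun x => x == v) with ht1
      set t2 := t.dropWhile (fun x => x == v) with ht2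
      have htsplit : t1 ++ t2 = t := List.takeWhile_append_dropWhile
      have ht1v : ∀ x ∈ t1, x = v := by
        intro x hxm
        have := List.mem_takeWhile_imp hxm
        simpa using this
      have ht2cnt : t2.count v = 0 := pc_drop_count v t hs
      have ht1cnt : t1.count v = t1.length := by
        rw [List.count_eq_length]
        intro b hb2
        exact (ht1v b hb2).symm
      have hrun : ((v :: t).count v : Int) = 1 + (t1.length : Int) := by
        rw [List.count_cons_self, ← htsplit, List.count_append, ht1cnt, ht2cnt]
        push_cast; ring
      have hcntne : ∀ w : Int, w ≠ v → (v :: t).count w = t2.count w := by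
        intro w hw
        rw [List.count_cons_of_ne (Ne.symm hw), ← htsplit, List.count_append]
        have : t1.count w = 0 := by
          rw [List.count_eq_zero]
          intro hwm
          exact hw (ht1v w hwm)
        omega
      have hs2 : t2.Pairwise (· ≤ ·) :=
        (List.pairwise_cons.mp hs).2.sublist (List.dropWhile_sublist _)
      have hx2 : ∀ x ∈ t2, ∃ k : Nat, k < 13 ∧ x = (k : Int) := by
        intro x hxm
        exact hx x (List.mem_cons_of_mem _ (((List.dropWhile_sublist _).mem hxm)))
      have hlen2 : t2.length ≤ n := by
        rw [ht2]
        have := List.length_dropWhile_le (fun x => x == v) t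
        simp only [List.length_cons] at hlen
        omega
      have hbest' : 0 ≤ (if best < 1 + (t1.length : Int) then 1 + (t1.length : Int) else best) := by
        split_ifs <;> omega
      rw [ih t2 hlen2 hs2 hx2 _ _ hbest']
      have hfold := pc_fold_max 13 (fun k => ((v :: t).count (k : Int) : Int))
        (fun k => (t2.count (k : Int) : Int)) kv hkv13
        (by
          intro k hk
          have hkv : (k : Int) ≠ v := by
            rw [hveq]
            exact_mod_cast fun h => hk (Nat.cast_injective h)
          simp [hcntne _ hkv])
        (by simp [← hveq, ht2cnt])
      have hfilt := pc_filter_len 13 (fun k => (v :: t).count (k : Int))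
        (fun k => t2.count (k : Int)) kv hkv13
        (by
          intro k hk
          have hkv : (k : Int) ≠ v := by
            rw [hveq]
            exact_mod_cast fun h => hk (Nat.cast_injective h)
          simp [hcntne _ hkv])
        (by simp [← hveq, ht2cnt])
      have hfkv : ((v :: t).count ((kv : Nat) : Int) : Int) = 1 + (t1.length : Int) := by
        rw [← hveq]; exact hrun
      beta_reduce at hfold hfilt
      rw [Prod.mk.injEq]
      refine ⟨?_, ?_⟩
      · rw [hfold, hfkv]
        have hb' : (if best < 1 + (t1.length:Int) then 1 + (t1.length:Int) else best)
            = max best (1 + (t1.length:Int)) := by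
          split_ifs with h
          · exact (max_eq_right h.le).symm
          · exact (max_eq_left (not_lt.mp h)).symm
        rw [hb', max_assoc]
      · rw [hfilt]
        have hcnt := hfkv
        push_cast
        split_ifs with h1 h2 h2 <;> push_cast at hcnt <;> omega

-- max(nonneg table) unwrapped equals the running max from 0
theorem pc_maxD (f : Nat → Int) (hf0 : 0 ≤ f 0) :
    (PySem.List.max? ((List.range 13).map f) (fun y => y)).getD 0
      = ((List.range 13).map f).foldl max 0 := by
  have hr13 : List.range 13 = [0,1,2,3,4,5,6,7,8,9,10,11,12] := by rfl
  rw [hr13]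
  simp only [List.map_cons, List.map_nil]
  rw [PySem.List.max?_id_cons]
  simp only [Option.getD_some, List.foldl_cons]
  rw [max_eq_right hf0]

-- B's value list is the cast of the index list
theorem pc_vals (ms : List Int) :
    ms.filterMap (fun c => if c = 0 then none else some ((PySem.Int.bitLength c : Int) - 1))
      = (pcIdx ms).map (fun (k : Nat) => (k : Int)) := by
  induction ms with
  | nil => simp [pcIdx]
  | cons c ms ih =>
    by_cases h0 : c = 0
    · simp only [pcIdx, List.filterMap_cons, if_pos h0] at *
      exact ih
    · have hpos := pc_bitLength_pos c h0
      simp only [pcIdx, List.filterMap_cons, if_neg h0] at *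
      rw [List.map_cons, ih]
      congr 1
      push_cast [Nat.cast_sub hpos]
      ring

-- ===== VERDICT (by name: the statement is the Claim_ definition above) =====
theorem pairCount_spec : Claim_equal_pairCount := by
  intro hand1 hand2 hand3 hand4 hand5 _
  unfold Spec_pairCount pairCount pairCount_alt
  dsimp only
  set ms := [hand1, hand2, hand3, hand4, hand5].map (fun x => PySem.Int.band x 0x1fff) with hms
  have hm : ∀ c ∈ ms, 0 ≤ c ∧ c ≤ 8191 := by
    intro c hc
    rw [hms] at hc
    simp only [List.mem_map] at hc
    obtain ⟨x, _, rfl⟩ := hc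
    exact pc_band_range x
  set L := pcIdx ms with hL
  have hL13 := pc_idx_lt ms hm
  -- A's table
  have hrep : (List.replicate 13 (0:Int)) = (List.range 13).map (fun _ => (0:Int)) := by
    rw [List.map_const', List.length_range]
  rw [hrep, pc_table ms hm (fun _ => (0:Int))]
  simp only [zero_add]
  -- B's sorted value list
  rw [pc_vals ms]
  set S := PySem.List.sorted ((pcIdx ms).map (fun (k : Nat) => (k : Int))) (fun y => y) with hS
  have hsp : S.Pairwise (· ≤ ·) := PySem.List.sorted_pairwise _ _
  have hperm : S.Perm ((pcIdx ms).map (fun (k : Nat) => (k : Int))) := PySem.List.sorted_perm _ _ _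
  have hcount : ∀ k : Nat, S.count ((k : Int)) = L.count k := by
    intro k
    rw [hperm.count_eq, hL]
    exact List.count_map_of_injective _ _ Nat.cast_injective k
  have hx : ∀ x ∈ S, ∃ k : Nat, k < 13 ∧ x = (k : Int) := by
    intro x hxm
    rw [hperm.mem_iff, List.mem_map] at hxm
    obtain ⟨k, hk, rfl⟩ := hxm
    exact ⟨k, hL13 k hk, rfl⟩
  rw [pc_run S hsp hx 0 0 le_rfl]
  have hM0 : 0 ≤ (((List.range 13).map (fun (k : Nat) => (S.count (k : Int) : Int))).foldl max 0) :=
    pc_fold_nonneg _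
  rw [max_eq_right hM0, zero_add]
  -- match the two components
  have hmapeq : (List.range 13).map (fun (k : Nat) => (S.count (k : Int) : Int))
      = (List.range 13).map (fun k => ((L.count k : Nat) : Int)) := by
    apply List.map_congr_left
    intro k _
    rw [hcount k]
  have hfilteq : (List.range 13).filter (fun (k : Nat) => decide (1 < S.count (k : Int)))
      = (List.range 13).filter (fun k => decide (1 < L.count k)) := by
    apply List.filter_congr
    intro k _
    rw [hcount k]
  rw [hmapeq, hfilteq]
  rw [Prod.mk.injEq]
  refine ⟨?_, ?_⟩
  · rw [pc_maxD (fun k => ((L.count k : Nat) : Int)) (by positivity)]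
  · rw [List.filter_map, List.length_map]
    refine congrArg (fun n : Nat => (n : Int)) (congrArg List.length (List.filter_congr ?_))
    intro k _
    simp [Function.comp]
    rw [hL]
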